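-- pv_equiv track=rewrite | github.com/dikoko/practice | 2 Sequences/2-45_derangement.py | get_derangement
-- ===== SOURCE A (Python) =====
-- def get_derangement(instr):
--     if not instr: return
--
--     inlist = list(instr)
--     len_in = len(inlist)
--
--     def _derange(i, sublist):
--         if not sublist: return [[]]
--
--         out_list = []
--         len_sub = len(sublist)
--         for j in range(len_sub):
--             if sublist[j] != inlist[i]:
--                 picked = sublist[j]
--                 picked_results = _derange(i+1, sublist[:j] + sublist[j+1:])
--                 for item in picked_results:
--                     item.append(picked)
--                 out_list += picked_results
--
--         return out_list
--
--     results = _derange(0, inlist)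
--     return ["".join(reversed(item)) for item in results]
-- ===== SOURCE B (Python) =====
-- from itertools import permutations
--
-- def get_derangement(instr):
--     if not instr:
--         return
--     n = len(instr)
--     return ["".join(p) for p in permutations(instr)
--             if all(p[i] != instr[i] for i in range(n))]
-- ===== Notes on version B (the rewrite author's own statement) =====
-- stated objective: simpler
-- what changed: Replaced the hand-rolled pruned recursive search (which builds each derangement reversed in an accumulator and un-reverses at the end) with a two-line generate-and-test over itertools.permutations with a positionwise filter.
import Mathlib
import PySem

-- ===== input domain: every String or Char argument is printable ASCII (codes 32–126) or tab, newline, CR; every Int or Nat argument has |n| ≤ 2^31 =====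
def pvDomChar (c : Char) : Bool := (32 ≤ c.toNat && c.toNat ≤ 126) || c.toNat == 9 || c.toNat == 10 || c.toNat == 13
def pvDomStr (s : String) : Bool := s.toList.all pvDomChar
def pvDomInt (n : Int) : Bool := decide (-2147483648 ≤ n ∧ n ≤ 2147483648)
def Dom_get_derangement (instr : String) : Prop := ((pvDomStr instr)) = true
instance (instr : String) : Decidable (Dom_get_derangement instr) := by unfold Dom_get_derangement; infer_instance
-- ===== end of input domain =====

-- B replaces A's pruned recursive accumulator search by generate-and-test over
-- itertools.permutations (simpler; same output, order and duplicates included).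

-- ===== PORT A =====
-- _derange(i, sublist); fuel is a totality guard only (always called with fuel = sublist.length,
-- so the fuel-exhausted branch is unreachable). i is Python's int index into inlist; it starts
-- at 0 and only grows, so Nat is exact; inlist[i] is ported as inlist[i]? (none = IndexError,
-- on which Python would raise — that branch leaves the accumulator unchanged and is only
-- reachable together with an empty result, see the proofs).
-- sublist[:j] + sublist[j+1:] with 0 ≤ j < len(sublist) is exactly take j ++ drop (j+1).
def pvDerangeA (inlist : List Char) : Nat → Nat → List Char → List (List Char)
  | 0, _, sub => if sub = [] then [[]] else []
  | fuel+1, i, sub =>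
    if sub = [] then [[]]
    else
      (List.range sub.length).foldl (fun out j =>
        match sub[j]?, inlist[i]? with
        | some sj, some ci =>
          if sj ≠ ci then
            out ++ (pvDerangeA inlist fuel (i+1) (sub.take j ++ sub.drop (j+1))).map
                     (fun item => item ++ [sj])
          else out
        | _, _ => out) []

def get_derangement (instr : String) : Option (List String) :=
  if instr = "" then none
  else
    let inlist := instr.toList
    let len_in := inlist.length
    let results := pvDerangeA inlist len_in 0 inlist
    -- "".join(reversed(item)) on a list of single chars is String.ofList item.reverse
    some (results.map (fun item => String.ofList item.reverse))

-- ===== PORT B =====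
def get_derangement_alt (instr : String) : Option (List String) :=
  if instr = "" then none
  else
    let chars := instr.toList
    let n := chars.length
    some (((PySem.List.permutations chars n).filter
             (fun p => (List.range n).all (fun i => p[i]? != chars[i]?))).map
           (fun p => String.ofList p))

-- ===== PRECONDITION & SPEC =====
def Spec_get_derangement (instr : String) (out : Option (List String)) : Prop := out = get_derangement_alt instr
instance (instr : String) (out : Option (List String)) : Decidable (Spec_get_derangement instr out) := by unfold Spec_get_derangement; infer_instance

-- ===== CLAIM (what is proved, stated in full; the proofs are below) =====
def Claim_equal_get_derangement : Prop := ∀ (instr : String), Dom_get_derangement instr → Spec_get_derangement instr (get_derangement instr)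

-- ===== LEMMAS AND PROOFS =====

-- proof helper: "p is a derangement of inlist from position i on", read off left to right
def pvDFrom (inlist : List Char) : Nat → List Char → Bool
  | _, [] => true
  | i, c :: p =>
    match inlist[i]? with
    | some ci => (decide (c ≠ ci)) && pvDFrom inlist (i+1) p
    | none => false

lemma pvDFrom_iff (inlist : List Char) : ∀ (p : List Char) (i : Nat),
    i + p.length ≤ inlist.length →
    (pvDFrom inlist i p = true ↔ ∀ k < p.length, p[k]? ≠ inlist[i+k]?) := by
  intro p
  induction p with
  | nil => intro i _; simp [pvDFrom]
  | cons c p ih =>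
    intro i hle
    have hi : i < inlist.length := by simp at hle; omega
    have : inlist[i]? = some inlist[i] := List.getElem?_eq_getElem hi
    simp only [pvDFrom, this, Bool.and_eq_true, decide_eq_true_eq]
    rw [ih (i+1) (by simp at hle ⊢; omega)]
    constructor
    · rintro ⟨hc, hrest⟩ k hk
      cases k with
      | zero => simpa [this] using hc
      | succ k =>
        have := hrest k (by simpa using hk)
        simpa [Nat.add_assoc, Nat.add_comm 1 k] using this
    · intro h
      refine ⟨?_, ?_⟩
      · have h0 := h 0 (by simp)
        simp [this] at h0
        exact h0
      · intro k hk
        have := h (k+1) (by simpa using Nat.succ_lt_succ hk)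
        simpa [Nat.add_assoc, Nat.add_comm 1 k] using this

lemma pvDerangeA_eq (inlist : List Char) : ∀ (fuel : Nat) (sub : List Char), sub.length = fuel →
    ∀ i, pvDerangeA inlist fuel i sub =
      ((PySem.List.permutations sub fuel).filter (pvDFrom inlist i)).map List.reverse := by
  intro fuel
  induction fuel with
  | zero =>
    intro sub hlen i
    have : sub = [] := List.eq_nil_of_length_eq_zero hlen
    subst this
    simp [pvDerangeA, PySem.List.permutations, pvDFrom]
  | succ fuel ih =>
    intro sub hlen i
    have hne : sub ≠ [] := by intro h; subst h; simp at hlen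
    -- the loop body is "out ++ g j"
    have hfold : ∀ (init : List (List Char)),
        (List.range sub.length).foldl (fun out j =>
          match sub[j]?, inlist[i]? with
          | some sj, some ci =>
            if sj ≠ ci then
              out ++ (pvDerangeA inlist fuel (i+1) (sub.take j ++ sub.drop (j+1))).map
                       (fun item => item ++ [sj])
            else out
          | _, _ => out) init
        = init ++ (List.range sub.length).flatMap (fun j =>
            match sub[j]?, inlist[i]? with
            | some sj, some ci =>
              if sj ≠ ci then
                (pvDerangeA inlist fuel (i+1) (sub.take j ++ sub.drop (j+1))).map
                  (fun item => item ++ [sj])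
              else []
            | _, _ => []) := by
      intro init
      rw [show (fun out j =>
          match sub[j]?, inlist[i]? with
          | some sj, some ci =>
            if sj ≠ ci then
              out ++ (pvDerangeA inlist fuel (i+1) (sub.take j ++ sub.drop (j+1))).map
                       (fun item => item ++ [sj])
            else out
          | _, _ => out)
        = (fun (out : List (List Char)) (j : Nat) => out ++ (fun j =>
            match sub[j]?, inlist[i]? with
            | some sj, some ci =>
              if sj ≠ ci then
                (pvDerangeA inlist fuel (i+1) (sub.take j ++ sub.drop (j+1))).map
                  (fun item => item ++ [sj])
              else []
            | _, _ => []) j) from by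
          funext out j
          rcases h1 : sub[j]? with _ | sj <;> rcases h2 : inlist[i]? with _ | ci <;>
            simp only [h1]
          · simp
          · simp
          · simp
          · split_ifs <;> simp]
      exact PySem.List.foldl_append_eq_flatMap _ _ _
    show (if sub = [] then [[]] else _) = _
    rw [if_neg hne, hfold]
    show (List.range sub.length).flatMap _ =
      ((PySem.List.permutations sub (fuel+1)).filter (pvDFrom inlist i)).map List.reverse
    rw [show PySem.List.permutations sub (fuel+1)
        = (List.range sub.length).flatMap (fun j =>
            match sub[j]? with
            | none => []
            | some c => (PySem.List.permutations (sub.eraseIdx j) fuel).map (c :: ·)) from by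
      rw [PySem.List.permutations]
      congr 1
      funext j
      rcases h : sub[j]? <;> simp]
    rw [List.filter_flatMap, List.map_flatMap]
    apply List.flatMap_congr
    intro j hj
    have hjlt : j < sub.length := List.mem_range.mp hj
    have hsj : sub[j]? = some sub[j] := List.getElem?_eq_getElem hjlt
    have herase : sub.take j ++ sub.drop (j+1) = sub.eraseIdx j :=
      (List.eraseIdx_eq_take_drop_succ sub j).symm
    have herlen : (sub.eraseIdx j).length = fuel := by
      rw [List.length_eraseIdx_of_lt hjlt]; omega
    rcases h2 : inlist[i]? with _ | ci
    · -- inlist[i] out of range: both sides empty (every permutation of sub is nonempty here)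
      simp only [hsj]
      rw [List.filter_map]
      rw [show (pvDFrom inlist i ∘ fun p => sub[j] :: p) = fun _ => false from by
        funext p; simp [Function.comp, pvDFrom, h2]]
      simp
    · by_cases hc : sub[j] = ci
      · subst hc
        simp only [hsj]
        rw [List.filter_map]
        rw [show (pvDFrom inlist i ∘ fun p => sub[j] :: p) = fun _ => false from by
          funext p; simp [Function.comp, pvDFrom, h2]]
        simp
      · simp only [hsj]
        rw [if_pos (by exact hc)]
        rw [List.filter_map]
        rw [show (pvDFrom inlist i ∘ fun p => sub[j] :: p) = pvDFrom inlist (i+1) from by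
          funext p; simp [Function.comp, pvDFrom, h2, hc]]
        rw [herase, ih (sub.eraseIdx j) herlen (i+1)]
        simp [List.map_map, Function.comp]

lemma pvFilter_pred_eq (inlist : List Char) :
    (PySem.List.permutations inlist inlist.length).filter
        (fun p => (List.range inlist.length).all (fun i => p[i]? != inlist[i]?))
      = (PySem.List.permutations inlist inlist.length).filter (pvDFrom inlist 0) := by
  apply List.filter_congr
  intro p hp
  have hlen : p.length = inlist.length :=
    (PySem.List.perm_of_mem_permutations hp).length_eq
  rw [Bool.eq_iff_iff]
  rw [pvDFrom_iff inlist p 0 (by omega)]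
  simp [List.all_eq_true, hlen]

-- ===== VERDICT (by name: the statement is the Claim_ definition above) =====
theorem get_derangement_spec : Claim_equal_get_derangement := by
  intro instr _
  unfold Spec_get_derangement get_derangement get_derangement_alt
  by_cases h : instr = ""
  · simp [h]
  · rw [if_neg h, if_neg h]
    show some ((pvDerangeA instr.toList instr.toList.length 0 instr.toList).map
        (fun item => String.ofList item.reverse))
      = some (((PySem.List.permutations instr.toList instr.toList.length).filter
            (fun p => (List.range instr.toList.length).all (fun i => p[i]? != instr.toList[i]?))).map
          (fun p => String.ofList p))
    rw [pvDerangeA_eq instr.toList instr.toList.length instr.toList rfl 0]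
    rw [pvFilter_pred_eq]
    simp [List.map_map, Function.comp]
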